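-- pv_equiv track=rewrite | github.com/mttwht/WordleSolver | wordle.py | reduce_words
-- ===== SOURCE A (Python) =====
-- def reduce_words(words, guess, guess_result):
--     for i in range(5):
--         if guess_result[i] == '0':
--             words = [w for w in words if not w.count(guess[i])]
--         elif guess_result[i] == '1':
--             words = [w for w in words if w.count(guess[i]) and w[i] != guess[i]]
--         elif guess_result[i] == '2':
--             words = [w for w in words if w[i] == guess[i]]
--     return words
-- ===== SOURCE B (Python) =====
-- def reduce_words(words, guess, guess_result):
--     absent = [i for i in range(5) if guess_result[i] == '0']
--     present = [i for i in range(5) if guess_result[i] == '1']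
--     exact = [i for i in range(5) if guess_result[i] == '2']
--     out = []
--     for w in words:
--         if (all(guess[i] not in w for i in absent)
--                 and all(guess[i] in w and w[i] != guess[i] for i in present)
--                 and all(w[i] == guess[i] for i in exact)):
--             out.append(w)
--     return out
-- ===== Notes on version B (the rewrite author's own statement) =====
-- stated objective: alternative
-- what changed: A makes up to five sequential passes over the word list, rebuilding it once per guess position; B first compiles the feedback into absent/present/exact position groups and then makes a single explicit loop over the words, keeping each word iff it satisfies all three constraint groups via membership tests ('c in w') instead of count().
-- outside the precondition, e.g. on reduce_words(['bb'], 'bc', '21002'): A returns [], B raises IndexError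
import Mathlib
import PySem

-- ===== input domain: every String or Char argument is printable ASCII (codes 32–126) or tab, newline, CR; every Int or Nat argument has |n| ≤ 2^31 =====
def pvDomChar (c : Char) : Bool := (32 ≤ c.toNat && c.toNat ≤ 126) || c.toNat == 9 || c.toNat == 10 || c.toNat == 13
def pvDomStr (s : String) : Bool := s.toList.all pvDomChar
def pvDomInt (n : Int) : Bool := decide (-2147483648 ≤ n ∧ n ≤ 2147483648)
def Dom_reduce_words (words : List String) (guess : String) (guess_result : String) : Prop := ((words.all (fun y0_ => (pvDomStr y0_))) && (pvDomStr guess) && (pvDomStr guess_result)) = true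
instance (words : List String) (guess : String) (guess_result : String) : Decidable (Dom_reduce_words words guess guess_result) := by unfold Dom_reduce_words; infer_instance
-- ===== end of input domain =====

-- B replaces A's up-to-five sequential filtering passes by a compile-then-match design:
-- feedback is grouped into absent/present/exact position lists once, then one pass keeps
-- each word iff it satisfies all three constraint groups (membership tests, not counts)


-- ===== PORT A =====
-- A: for i in range(5), rebuild the word list by the branch selected by guess_result[i].
-- Indexing is via PySem pyGet? with a default; under Pre_ every index Python reads is in range.
def pvStepA (guess : String) (guess_result : String) (ws : List String) (i : Int) : List String :=
  let c := (PySem.Str.pyGet? guess_result i).getD ' '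
  let g := (PySem.Str.pyGet? guess i).getD ' '
  if c = '0' then
    ws.filter (fun w => PySem.Str.count w (String.singleton g) == 0)
  else if c = '1' then
    ws.filter (fun w => decide (PySem.Str.count w (String.singleton g) ≠ 0) &&
                        ((PySem.Str.pyGet? w i).getD ' ' != g))
  else if c = '2' then
    ws.filter (fun w => (PySem.Str.pyGet? w i).getD ' ' == g)
  else ws

def reduce_words (words : List String) (guess : String) (guess_result : String) : List String :=
  (PySem.List.pyRange 0 5 1).foldl (pvStepA guess guess_result) words

-- ===== PORT B =====
-- B: compile guess_result once into three position groups, then one explicit loop over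
-- words appending each word that meets every absent/present/exact constraint.
def pvGroup (guess_result : String) (code : Char) : List Int :=
  (PySem.List.pyRange 0 5 1).filter
    (fun i => (PySem.Str.pyGet? guess_result i).getD ' ' == code)

def pvMeets (guess : String) (absent present exact : List Int) (w : String) : Bool :=
  absent.all (fun i =>
      !PySem.Str.isIn (String.singleton ((PySem.Str.pyGet? guess i).getD ' ')) w) &&
  (present.all (fun i =>
      let g := (PySem.Str.pyGet? guess i).getD ' '
      PySem.Str.isIn (String.singleton g) w && ((PySem.Str.pyGet? w i).getD ' ' != g)) &&
   exact.all (fun i =>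
      (PySem.Str.pyGet? w i).getD ' ' == ((PySem.Str.pyGet? guess i).getD ' ')))

def reduce_words_alt (words : List String) (guess : String) (guess_result : String) : List String :=
  let absent := pvGroup guess_result '0'
  let present := pvGroup guess_result '1'
  let exact := pvGroup guess_result '2'
  words.foldl (fun out w => if pvMeets guess absent present exact w then out ++ [w] else out) []

-- ===== PRECONDITION & SPEC =====
-- Pre_ excludes the inputs on which Python A raises IndexError (guess_result shorter than 5,
-- or a fired '0'/'1'/'2' constraint indexing past a short guess or word); it is slightly
-- narrower than A's exact return set — some inputs with short guess/words on which A happens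
-- to return (a word is eliminated by an earlier pass before the out-of-range index at a later
-- position is ever read) are also excluded; see the cites.
def Pre_reduce_words (words : List String) (guess : String) (guess_result : String) : Prop :=
  5 ≤ guess_result.toList.length ∧
  ((List.range 5).all (fun i =>
     let c := guess_result.toList.getD i ' '
     if c == '0' then
       words.isEmpty || decide (i < guess.toList.length)
     else if c == '1' then
       words.isEmpty || (decide (i < guess.toList.length) &&
                         words.all (fun w =>
                           !(w.toList.contains (guess.toList.getD i ' ')) ||
                           decide (i < w.toList.length)))
     else if c == '2' then
       words.isEmpty || (decide (i < guess.toList.length) &&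
                         words.all (fun w => decide (i < w.toList.length)))
     else true)) = true
instance (words : List String) (guess : String) (guess_result : String) : Decidable (Pre_reduce_words words guess guess_result) := by unfold Pre_reduce_words; infer_instance

def pvWitness_reduce_words : List String × String × String := (["cat"], "ab", "xxxxx")

def Spec_reduce_words (words : List String) (guess : String) (guess_result : String) (out : List String) : Prop := out = reduce_words_alt words guess guess_result
instance (words : List String) (guess : String) (guess_result : String) (out : List String) : Decidable (Spec_reduce_words words guess guess_result out) := by unfold Spec_reduce_words; infer_instance

-- ===== CLAIM (what is proved, stated in full; the proofs are below) =====
def Claim_equal_reduce_words : Prop := ∀ (words : List String) (guess : String) (guess_result : String), Dom_reduce_words words guess guess_result → Pre_reduce_words words guess guess_result → Spec_reduce_words words guess guess_result (reduce_words words guess guess_result)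

-- ===== LEMMAS AND PROOFS =====

lemma pvRange5 : PySem.List.pyRange 0 5 1 = [0, 1, 2, 3, 4] := by decide

-- Python's s.count(c) for a single-character needle counts occurrences of that character
lemma pvCountGo_singleton (g : Char) :
    ∀ (fuel : Nat) (l : List Char) (acc : Nat),
      PySem.Chars.count.go [g] fuel l acc = acc + (l.take fuel).count g := by
  intro fuel
  induction fuel with
  | zero => intro l acc; simp [PySem.Chars.count.go]
  | succ n ih =>
    intro l acc
    cases l with
    | nil => simp [PySem.Chars.count.go]
    | cons h t =>
      show (if [g].isPrefixOf (h :: t) then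
              PySem.Chars.count.go [g] n (List.drop 1 (h :: t)) (acc + 1)
            else PySem.Chars.count.go [g] n t acc) = _
      by_cases hg : g = h
      · subst hg
        simp [List.isPrefixOf, List.drop_succ_cons, List.take_succ_cons, List.count_cons, ih]
        omega
      · simp [List.isPrefixOf, hg, Ne.symm hg, List.take_succ_cons, List.count_cons, ih]

lemma pvCharsCount_singleton (l : List Char) (g : Char) :
    PySem.Chars.count l [g] = l.count g := by
  have h := pvCountGo_singleton g l.length l 0
  rw [List.take_length, Nat.zero_add] at h
  exact h

lemma pvSingleton_infix (g : Char) (l : List Char) : [g] <:+: l ↔ g ∈ l := by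
  constructor
  · intro h; exact h.sublist.subset (by simp)
  · intro h
    obtain ⟨s, t, rfl⟩ := List.append_of_mem h
    exact ⟨s, t, by simp⟩

lemma pvCharsIsIn_singleton (l : List Char) (g : Char) :
    PySem.Chars.isIn [g] l = l.contains g := by
  by_cases h : g ∈ l
  · have ht : PySem.Chars.isIn [g] l = true := by
      rw [PySem.Chars.isIn_iff_infix, pvSingleton_infix]; exact h
    simp [ht, h]
  · have hf : PySem.Chars.isIn [g] l = false := by
      rw [PySem.Chars.isIn_eq_false_iff, pvSingleton_infix]; exact h
    simp [hf, h]

-- A tests count()==0 / count()!=0, B tests (not) membership: the same Bool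
lemma pvB0 (l : List Char) (g : Char) :
    (PySem.Chars.count l [g] == 0) = !PySem.Chars.isIn [g] l := by
  by_cases h : g ∈ l <;>
    simp [pvCharsCount_singleton, pvCharsIsIn_singleton, h, List.count_eq_zero]

lemma pvB1 (l : List Char) (g : Char) :
    (!decide (PySem.Chars.count l [g] = 0)) = PySem.Chars.isIn [g] l := by
  by_cases h : g ∈ l <;>
    simp [pvCharsCount_singleton, pvCharsIsIn_singleton, h, List.count_eq_zero]

-- the shared per-position predicate, in B's membership form (proof-only)
def pvP (guess : String) (guess_result : String) (w : String) (i : Int) : Bool :=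
  let c := (PySem.Str.pyGet? guess_result i).getD ' '
  let g := (PySem.Str.pyGet? guess i).getD ' '
  if c = '0' then !PySem.Str.isIn (String.singleton g) w
  else if c = '1' then PySem.Str.isIn (String.singleton g) w &&
                       ((PySem.Str.pyGet? w i).getD ' ' != g)
  else if c = '2' then (PySem.Str.pyGet? w i).getD ' ' == g
  else true

-- each A-pass is the filter by that position's predicate
lemma pvStepA_eq_filter (guess guess_result : String) (ws : List String) (i : Int) :
    pvStepA guess guess_result ws i = ws.filter (fun w => pvP guess guess_result w i) := by
  unfold pvStepA pvP
  by_cases h0 : (PySem.Str.pyGet? guess_result i).getD ' ' = '0' <;>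
  by_cases h1 : (PySem.Str.pyGet? guess_result i).getD ' ' = '1' <;>
  by_cases h2 : (PySem.Str.pyGet? guess_result i).getD ' ' = '2' <;>
  simp only [PySem.Str.pyGet?_eq, PySem.Chars.pyGet?_eq_listPyGet?] at h0 h1 h2 <;>
  simp [h0, h1, h2, pvB0, pvB1]

-- three filters over mutually exclusive codes, each tested wholesale, amount to one
-- combined per-element test
lemma pvTri (l : List Int) (c : Int → Char) (A0 A1 A2 : Int → Bool) :
    ((l.filter (fun x => c x == '0')).all A0 &&
     ((l.filter (fun x => c x == '1')).all A1 &&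
      (l.filter (fun x => c x == '2')).all A2))
    = l.all (fun x => if c x = '0' then A0 x
                      else if c x = '1' then A1 x
                      else if c x = '2' then A2 x else true) := by
  induction l with
  | nil => simp
  | cons x l ih =>
    simp only [List.filter_cons, List.all_cons]
    simp at ih
    by_cases h0 : c x = '0'
    · simp [h0, ih, Bool.and_assoc, Bool.and_left_comm]
    · by_cases h1 : c x = '1'
      · simp [h0, h1, ih, Bool.and_assoc, Bool.and_left_comm]
      · by_cases h2 : c x = '2'
        · simp [h0, h1, h2, ih, Bool.and_assoc, Bool.and_left_comm]
        · simp [h0, h1, h2, ih]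

lemma pvMeets_eq_all (guess guess_result w : String) :
    pvMeets guess (pvGroup guess_result '0') (pvGroup guess_result '1')
      (pvGroup guess_result '2') w
    = [(0 : Int), 1, 2, 3, 4].all (fun i => pvP guess guess_result w i) := by
  unfold pvMeets pvGroup
  rw [pvRange5, pvTri [(0 : Int), 1, 2, 3, 4]
      (fun i => (PySem.Str.pyGet? guess_result i).getD ' ')]
  unfold pvP
  simp

-- ===== VERDICT (by name: the statement is the Claim_ definition above) =====
theorem reduce_words_spec : Claim_equal_reduce_words := by
  intro words guess guess_result _ _
  unfold Spec_reduce_words reduce_words reduce_words_alt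
  rw [PySem.List.foldl_append_if_eq_filter, pvRange5]
  simp only [List.nil_append, List.foldl, pvStepA_eq_filter, List.filter_filter]
  apply List.filter_congr
  intro w _
  rw [pvMeets_eq_all]
  simp only [List.all_cons, List.all_nil]
  cases pvP guess guess_result w 0 <;> cases pvP guess guess_result w 1 <;>
  cases pvP guess guess_result w 2 <;> cases pvP guess guess_result w 3 <;>
  cases pvP guess guess_result w 4 <;> simp
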